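-- pv_equiv track=rewrite | github.com/Algorithm-Coding-Test-Data-Analysis/algoview | data/py/lv1/Lv1_2024_카카오_가장 많이 받은 선물_구현_성철.py | solution
-- ===== SOURCE A (Python) =====
-- def solution(friends, gifts):
--     score = {name: {friend: 0 for friend in friends} for name in friends}
--
--     for gift in gifts:
--         p, d = gift.split()
--
--         score[p][p] += 1
--         score[d][d] -= 1
--
--         score[p][d] += 1
--         score[d][p] -= 1
--
--     gift = {name: 0 for name in friends}
--
--     for order, fre in score.items():
--         cnt = 0
--         for k, v in fre.items():
--             if v > 0 and order != k:
--                 cnt += 1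
--             elif v == 0 and (score[k][k] < score[order][order]) and order != k:
--                 cnt += 1
--         gift[order] = cnt
--
--     return max(gift.values())
-- ===== SOURCE B (Python) =====
-- def solution(friends, gifts):
--     counts = {}
--     given = {}
--     received = {}
--     for name in friends:
--         given[name] = 0
--         received[name] = 0
--     for gift in gifts:
--         p, d = gift.split()
--         counts[(p, d)] = counts.get((p, d), 0) + 1
--         given[p] += 1
--         received[d] += 1
--     names = list(dict.fromkeys(friends))
--     index = {n: given[n] - received[n] for n in names}
--     # rank pass: extra[n] = number of friends with strictly smaller gift index,
--     # read off one sorted order in a single scan (run_start marks the start of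
--     # the current block of equal indices)
--     order = sorted(names, key=lambda n: index[n])
--     extra = {n: 0 for n in names}
--     prev = None
--     run_start = 0
--     for j, n in enumerate(order):
--         if prev is not None and index[n] != prev:
--             run_start = j
--         extra[n] = run_start
--         prev = index[n]
--     # correction pass over gifted pairs only: a pair with x > y is a win for p
--     # regardless of index; the rank pass already credited p iff index[d] < index[p],
--     # and wrongly credited d in that losing pair iff index[p] < index[d]
--     for (p, d), x in counts.items():
--         y = counts.get((d, p), 0)
--         if x > y:
--             if index[d] >= index[p]:
--                 extra[p] += 1
--             if index[p] < index[d]: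
--                 extra[d] -= 1
--     return max(extra.values())
-- ===== Notes on version B (the rewrite author's own statement) =====
-- stated objective: alternative
-- what changed: B replaces A's n-by-n score matrix and per-person scan of all n matrix entries by a sort-based rank pass (extra[n] = number of friends with strictly smaller gift index, read off one sorted order in a single scan) plus a correction pass over the gifted ordered pairs only, so no quadratic all-pairs comparison is ever made.
import Mathlib
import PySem

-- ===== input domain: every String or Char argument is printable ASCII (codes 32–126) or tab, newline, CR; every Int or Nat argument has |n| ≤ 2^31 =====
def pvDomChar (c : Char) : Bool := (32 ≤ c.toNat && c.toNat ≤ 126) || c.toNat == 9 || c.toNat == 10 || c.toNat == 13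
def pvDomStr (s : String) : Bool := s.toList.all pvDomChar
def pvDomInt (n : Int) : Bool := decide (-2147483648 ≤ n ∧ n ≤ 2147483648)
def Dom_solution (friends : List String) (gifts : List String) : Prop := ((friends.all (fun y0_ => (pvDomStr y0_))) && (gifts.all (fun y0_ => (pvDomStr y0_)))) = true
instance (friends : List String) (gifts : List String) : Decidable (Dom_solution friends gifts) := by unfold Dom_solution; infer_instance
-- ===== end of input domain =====

-- B avoids A's n-by-n score matrix and its per-person scan of all n entries: one sorted order
-- of the friends by gift index gives each friend their rank (number of strictly smaller
-- indices) in a single scan, and a second pass over the gifted ordered pairs only corrects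
-- that rank where the gift counts are not tied; objective: alternative algorithm (no
-- all-pairs comparison).

-- ===== PORT A =====
-- one gift "p d": the four matrix updates of A's gift loop
def aGiftStep (sc : PySem.Dict String (PySem.Dict String Int)) (gift : String) :
    PySem.Dict String (PySem.Dict String Int) :=
  match PySem.Str.split₀ gift with
  | [p, d] =>
    let sc1 := sc.insert p ((sc.getD p PySem.Dict.empty).modify p 0 (· + 1))
    let sc2 := sc1.insert d ((sc1.getD d PySem.Dict.empty).modify d 0 (· - 1))
    let sc3 := sc2.insert p ((sc2.getD p PySem.Dict.empty).modify d 0 (· + 1))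
    let sc4 := sc3.insert d ((sc3.getD d PySem.Dict.empty).modify p 0 (· - 1))
    sc4
  | _ => sc

def solution (friends : List String) (gifts : List String) : Int :=
  let score0 : PySem.Dict String (PySem.Dict String Int) :=
    friends.foldl (fun d name =>
      d.insert name (friends.foldl (fun i f => i.insert f 0) PySem.Dict.empty)) PySem.Dict.empty
  let score := gifts.foldl aGiftStep score0
  let gift0 : PySem.Dict String Int := friends.foldl (fun g n => g.insert n 0) PySem.Dict.empty
  let giftD := score.items.foldl (fun g pr =>
      let order := pr.1
      let fre := pr.2
      let cnt : Int := fre.items.foldl (fun cnt kv =>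
          if kv.2 > 0 ∧ order ≠ kv.1 then cnt + 1
          else if kv.2 = 0 ∧ (score.getD kv.1 PySem.Dict.empty).getD kv.1 0 < (score.getD order PySem.Dict.empty).getD order 0 ∧ order ≠ kv.1 then cnt + 1
          else cnt) 0
      g.insert order cnt) gift0
  match PySem.List.max? giftD.values (fun y => y) with
  | some m => m
  | none => 0  -- unreached under Pre_ (friends ≠ []): Python's max([]) raises ValueError

-- ===== PORT B =====
-- one gift "p d": update the pair counter and the given/received tallies (Source B's gift loop)
def bGiftStep
    (st : PySem.Dict (String × String) Int × PySem.Dict String Int × PySem.Dict String Int)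
    (gift : String) :
    PySem.Dict (String × String) Int × PySem.Dict String Int × PySem.Dict String Int :=
  match PySem.Str.split₀ gift with
  | [p, d] =>
      (st.1.insert (p, d) (st.1.getD (p, d) 0 + 1),
       st.2.1.modify p 0 (· + 1),
       st.2.2.modify d 0 (· + 1))
  | _ => st

-- body of Source B's rank loop: state = (prev, run_start, extra)
def bRankStep (index : PySem.Dict String Int)
    (st : Option Int × Int × PySem.Dict String Int) (jn : Int × String) :
    Option Int × Int × PySem.Dict String Int :=
  let j := jn.1
  let n := jn.2
  let run_start : Int :=
    match st.1 with
    | some pv => if index.getD n 0 ≠ pv then j else st.2.1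
    | none => st.2.1
  (some (index.getD n 0), run_start, st.2.2.insert n run_start)

-- body of Source B's correction loop over counts.items()
def bPairStep (counts : PySem.Dict (String × String) Int) (index : PySem.Dict String Int)
    (extra : PySem.Dict String Int) (kv : (String × String) × Int) : PySem.Dict String Int :=
  let p := kv.1.1
  let d := kv.1.2
  let x := kv.2
  let y := counts.getD (d, p) 0
  if x > y then
    let extra1 := if index.getD d 0 ≥ index.getD p 0 then extra.modify p 0 (· + 1) else extra
    if index.getD p 0 < index.getD d 0 then extra1.modify d 0 (· - 1) else extra1
  else extra

def solution_alt (friends : List String) (gifts : List String) : Int :=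
  let given0 : PySem.Dict String Int := friends.foldl (fun d n => d.insert n 0) PySem.Dict.empty
  let received0 : PySem.Dict String Int := friends.foldl (fun d n => d.insert n 0) PySem.Dict.empty
  let st := gifts.foldl bGiftStep (PySem.Dict.empty, given0, received0)
  let counts := st.1
  let given := st.2.1
  let received := st.2.2
  let names := PySem.List.dedup friends
  let index : PySem.Dict String Int :=
    names.foldl (fun d n => d.insert n (given.getD n 0 - received.getD n 0)) PySem.Dict.empty
  let order := PySem.List.sorted names (fun n => index.getD n 0)
  let extra0 : PySem.Dict String Int := names.foldl (fun d n => d.insert n 0) PySem.Dict.empty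
  let st2 := (PySem.List.enumerate order 0).foldl (bRankStep index)
    ((none : Option Int), (0 : Int), extra0)
  let extra := counts.items.foldl (bPairStep counts index) st2.2.2
  match PySem.List.max? extra.values (fun y => y) with
  | some m => m
  | none => 0  -- unreached under Pre_ (friends ≠ [])

-- ===== PRECONDITION & SPEC =====
-- Pre_ excludes exactly the inputs where A raises: empty friends (max() on an empty sequence,
-- ValueError), a gift that does not split into exactly two words (ValueError on unpacking),
-- and a gift naming someone not in friends (KeyError).
def Pre_solution (friends : List String) (gifts : List String) : Prop :=
  friends ≠ [] ∧ ∀ g ∈ gifts, (PySem.Str.split₀ g).length = 2 ∧ ∀ t ∈ PySem.Str.split₀ g, t ∈ friends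
instance (friends : List String) (gifts : List String) : Decidable (Pre_solution friends gifts) := by
  unfold Pre_solution; infer_instance

def pvWitness_solution : List String × List String :=
  (["muzi", "ryan", "frodo"], ["muzi ryan", "ryan frodo", "muzi frodo", "ryan muzi"])

def Spec_solution (friends : List String) (gifts : List String) (out : Int) : Prop := out = solution_alt friends gifts
instance (friends : List String) (gifts : List String) (out : Int) : Decidable (Spec_solution friends gifts out) := by unfold Spec_solution; infer_instance

-- ===== CLAIM (what is proved, stated in full; the proofs are below) =====
def Claim_equal_solution : Prop := ∀ (friends : List String) (gifts : List String), Dom_solution friends gifts → Pre_solution friends gifts → Spec_solution friends gifts (solution friends gifts)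


-- ===== LEMMAS AND PROOFS =====

-- the (giver, receiver) pairs of the parsed gift list
def gpairs (gs : List String) : List (String × String) :=
  gs.filterMap (fun g => match PySem.Str.split₀ g with | [p, d] => some (p, d) | _ => none)

-- net gift index of a person: given minus received
def idxL (L : List (String × String)) (a : String) : Int :=
  (L.countP (fun q => q.1 == a) : Int) - (L.countP (fun q => q.2 == a) : Int)

-- net gifts from a to k
def netL (L : List (String × String)) (a k : String) : Int :=
  (L.count (a, k) : Int) - (L.count (k, a) : Int)

-- the value A's score matrix holds at cell (a, k)
def DL (L : List (String × String)) (a k : String) : Int :=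
  if a = k then idxL L a else netL L a k

-- "a receives a gift from b next month", in terms of B's counts/index dicts
def wcond (c : PySem.Dict (String × String) Int) (i : PySem.Dict String Int)
    (a b : String) : Bool :=
  decide (c.getD (a, b) 0 > c.getD (b, a) 0 ∨
    (c.getD (a, b) 0 = c.getD (b, a) 0 ∧ i.getD a 0 > i.getD b 0))

lemma wcond_iff (c : PySem.Dict (String × String) Int) (i : PySem.Dict String Int)
    (a b : String) :
    (c.getD (a, b) 0 > c.getD (b, a) 0 ∨
      (c.getD (a, b) 0 = c.getD (b, a) 0 ∧ i.getD a 0 > i.getD b 0)) ↔ wcond c i a b = true := by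
  unfold wcond; rw [decide_eq_true_eq]

lemma DL_nil (a k : String) : DL [] a k = 0 := by
  simp [DL, idxL, netL]

set_option maxRecDepth 8192 in
lemma DL_append (L : List (String × String)) (p d a k : String) :
    DL (L ++ [(p, d)]) a k = DL L a k
      + (if a = p then if k = p then 1 else 0 else 0)
      - (if a = d then if k = d then 1 else 0 else 0)
      + (if a = p then if k = d then 1 else 0 else 0)
      - (if a = d then if k = p then 1 else 0 else 0) := by
  by_cases hap : a = p <;> by_cases had : a = d <;> by_cases hkp : k = p <;>
    by_cases hkd : k = d <;> by_cases hak : a = k <;> subst_vars <;>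
    simp_all [DL, idxL, netL, List.countP_append, List.count_append, List.count_cons,
      List.countP_cons, beq_iff_eq, Prod.mk.injEq] <;>
    push_cast <;> (try split_ifs) <;> (try simp_all [eq_comm]) <;> omega

lemma gpairs_cons (g : String) (t : List String) :
    gpairs (g :: t) =
      (match PySem.Str.split₀ g with | [p, d] => [(p, d)] | _ => []) ++ gpairs t := by
  unfold gpairs
  rw [List.filterMap_cons]
  rcases PySem.Str.split₀ g with _ | ⟨p, _ | ⟨d, _ | ⟨e, r⟩⟩⟩ <;> rfl

-- generic dict-fold helpers ------------------------------------------------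

lemma getD_foldl_insert_const {ν : Type} (l : List String) (v : ν)
    (d : PySem.Dict String ν) (c : String) (dflt : ν) :
    (l.foldl (fun d n => d.insert n v) d).getD c dflt = if c ∈ l then v else d.getD c dflt := by
  induction l generalizing d with
  | nil => simp
  | cons n t ih =>
      simp only [List.foldl_cons, ih, List.mem_cons]
      by_cases hct : c ∈ t <;> by_cases hcn : c = n <;>
        simp [hct, hcn, PySem.Dict.getD_insert]

lemma getD_foldl_insert_key_not_mem {κ ν α : Type} [BEq κ] [LawfulBEq κ]
    (l : List α) (key : α → κ) (F : α → ν) (d : PySem.Dict κ ν) (c : κ) (dflt : ν)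
    (hc : c ∉ l.map key) :
    (l.foldl (fun g y => g.insert (key y) (F y)) d).getD c dflt = d.getD c dflt := by
  induction l generalizing d with
  | nil => simp
  | cons y t ih =>
      simp only [List.map_cons, List.mem_cons, not_or] at hc
      simp only [List.foldl_cons, ih _ hc.2]
      exact PySem.Dict.getD_insert_of_ne _ _ _ hc.1

lemma getD_foldl_insert_key {κ ν α : Type} [BEq κ] [LawfulBEq κ]
    (l : List α) (key : α → κ) (F : α → ν) (d : PySem.Dict κ ν) (dflt : ν)
    (hnd : (l.map key).Nodup) (x : α) (hx : x ∈ l) :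
    (l.foldl (fun g y => g.insert (key y) (F y)) d).getD (key x) dflt = F x := by
  induction l generalizing d with
  | nil => simp at hx
  | cons y t ih =>
      simp only [List.map_cons, List.nodup_cons] at hnd
      rcases List.mem_cons.mp hx with rfl | hxt
      · have hkey : key x ∉ t.map key := hnd.1
        simp only [List.foldl_cons]
        rw [getD_foldl_insert_key_not_mem t key F _ _ _ hkey,
          PySem.Dict.getD_insert_self]
      · exact ih _ hnd.2 hxt

lemma set_update_eq_self (s l : List String) (h : ∀ x ∈ l, x ∈ s) :
    PySem.Set.update s l = s := by
  induction l generalizing s with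
  | nil => rfl
  | cons x t ih =>
      have hx : PySem.Set.add s x = s := by
        simp [PySem.Set.add, PySem.Set.contains, h x (by simp)]
      show PySem.Set.update (PySem.Set.add s x) t = s
      rw [hx]
      exact ih s (fun y hy => h y (by simp [hy]))

lemma set_update_append (l : List String) : ∀ (s : List String), l.Nodup →
    (∀ x ∈ l, x ∉ s) → PySem.Set.update s l = s ++ l := by
  induction l with
  | nil => simp [PySem.Set.update]
  | cons x t ih =>
      intro s hnd hdisj
      have hx : PySem.Set.add s x = s ++ [x] := by
        simp [PySem.Set.add, PySem.Set.contains, hdisj x (by simp)]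
      show PySem.Set.update (PySem.Set.add s x) t = s ++ x :: t
      rw [hx, ih _ (List.nodup_cons.mp hnd).2]
      · simp
      · intro y hy
        simp only [List.mem_append, List.mem_singleton, not_or]
        exact ⟨fun hc => hdisj y (by simp [hy]) hc, fun hc => (List.nodup_cons.mp hnd).1 (hc ▸ hy)⟩

lemma set_ofList_of_nodup (l : List String) (h : l.Nodup) : PySem.Set.ofList l = l := by
  have := set_update_append l [] h (by simp)
  simpa [PySem.Set.ofList] using this

-- A-side: characterisation of the score matrix -----------------------------

def ScoreInv (ns : List String) (L : List (String × String))
    (sc : PySem.Dict String (PySem.Dict String Int)) : Prop :=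
  sc.keys = ns ∧ ∀ a ∈ ns, (sc.getD a PySem.Dict.empty).keys = ns ∧
    ∀ k : String, (sc.getD a PySem.Dict.empty).getD k 0 = DL L a k

lemma dict_insert_keys {ν : Type} (dd : PySem.Dict String ν) (ns : List String)
    (x : String) (v : ν) (hk : dd.keys = ns) (hx : x ∈ ns) :
    (dd.insert x v).keys = ns := by
  rw [PySem.Dict.keys_insert_of_contains]
  · exact hk
  · rw [PySem.Dict.contains_eq_decide_mem_keys, hk]
    simpa using hx

lemma dict_modify_keys {ν : Type} (dd : PySem.Dict String ν) (ns : List String) (r : String)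
    (d0 : ν) (f : ν → ν) (hk : dd.keys = ns) (hr : r ∈ ns) :
    (dd.modify r d0 f).keys = ns := by
  rw [PySem.Dict.keys_modify]
  exact dict_insert_keys _ _ _ _ hk hr

-- one of the four updates of A's gift loop: score[q][r] = f(score[q][r])
def updA (sc : PySem.Dict String (PySem.Dict String Int)) (q r : String) (f : Int → Int) :
    PySem.Dict String (PySem.Dict String Int) :=
  sc.insert q ((sc.getD q PySem.Dict.empty).modify r 0 f)

lemma aGiftStep_eq (sc : PySem.Dict String (PySem.Dict String Int)) (g p d : String)
    (hsplit : PySem.Str.split₀ g = [p, d]) :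
    aGiftStep sc g
      = updA (updA (updA (updA sc p p (· + 1)) d d (· - 1)) p d (· + 1)) d p (· - 1) := by
  unfold aGiftStep updA
  rw [hsplit]

lemma updA_inner (sc : PySem.Dict String (PySem.Dict String Int)) (q r : String)
    (f : Int → Int) (a : String) :
    (updA sc q r f).getD a PySem.Dict.empty
      = if a = q then (sc.getD a PySem.Dict.empty).modify r 0 f
        else sc.getD a PySem.Dict.empty := by
  unfold updA
  rw [PySem.Dict.getD_insert]
  by_cases haq : a = q
  · subst haq; simp
  · simp [haq]

lemma updA_getD (sc : PySem.Dict String (PySem.Dict String Int)) (q r : String)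
    (f : Int → Int) (a k : String) :
    ((updA sc q r f).getD a PySem.Dict.empty).getD k 0
      = if a = q ∧ k = r then f ((sc.getD a PySem.Dict.empty).getD k 0)
        else (sc.getD a PySem.Dict.empty).getD k 0 := by
  rw [updA_inner]
  by_cases haq : a = q
  · subst haq
    rw [if_pos rfl, PySem.Dict.getD_modify]
    by_cases hkr : k = r <;> simp [hkr]
  · simp [haq]

lemma updA_keys (sc : PySem.Dict String (PySem.Dict String Int)) (ns : List String)
    (q r : String) (f : Int → Int) (hk : sc.keys = ns) (hq : q ∈ ns) :
    (updA sc q r f).keys = ns :=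
  dict_insert_keys _ _ _ _ hk hq

lemma updA_innerKeys (sc : PySem.Dict String (PySem.Dict String Int)) (ns : List String)
    (q r : String) (f : Int → Int) (a : String)
    (hia : (sc.getD a PySem.Dict.empty).keys = ns)
    (hiq : (sc.getD q PySem.Dict.empty).keys = ns) (hr : r ∈ ns) :
    ((updA sc q r f).getD a PySem.Dict.empty).keys = ns := by
  rw [updA_inner]
  by_cases haq : a = q
  · subst haq
    rw [if_pos rfl]
    exact dict_modify_keys _ _ _ _ _ hia hr
  · rw [if_neg haq]
    exact hia

set_option maxHeartbeats 1000000 in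
lemma scoreInv_step (ns : List String) (L : List (String × String))
    (sc : PySem.Dict String (PySem.Dict String Int)) (p d : String)
    (hp : p ∈ ns) (hd : d ∈ ns) (h : ScoreInv ns L sc)
    (g : String) (hsplit : PySem.Str.split₀ g = [p, d]) :
    ScoreInv ns (L ++ [(p, d)]) (aGiftStep sc g) := by
  obtain ⟨hkeys, hinner⟩ := h
  rw [aGiftStep_eq sc g p d hsplit]
  refine ⟨?_, ?_⟩
  · exact updA_keys _ _ _ _ _
      (updA_keys _ _ _ _ _
        (updA_keys _ _ _ _ _
          (updA_keys _ _ _ _ _ hkeys hp) hd) hp) hd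
  · intro a ha
    have h1 : ∀ x ∈ ns, ((updA sc p p (· + 1)).getD x PySem.Dict.empty).keys = ns :=
      fun x hx => updA_innerKeys _ _ _ _ _ _ (hinner x hx).1 (hinner p hp).1 hp
    have h2 : ∀ x ∈ ns,
        ((updA (updA sc p p (· + 1)) d d (· - 1)).getD x PySem.Dict.empty).keys = ns :=
      fun x hx => updA_innerKeys _ _ _ _ _ _ (h1 x hx) (h1 d hd) hd
    have h3 : ∀ x ∈ ns,
        ((updA (updA (updA sc p p (· + 1)) d d (· - 1)) p d (· + 1)).getD x
          PySem.Dict.empty).keys = ns :=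
      fun x hx => updA_innerKeys _ _ _ _ _ _ (h2 x hx) (h2 p hp) hd
    refine ⟨updA_innerKeys _ _ _ _ _ _ (h3 a ha) (h3 d hd) hp, ?_⟩
    intro k
    rw [updA_getD, updA_getD, updA_getD, updA_getD, (hinner a ha).2 k, DL_append]
    split_ifs <;> first | omega | tauto
lemma scoreInv_fold (ns : List String) (gs : List String)
    (h : ∀ g ∈ gs, (PySem.Str.split₀ g).length = 2 ∧ ∀ t ∈ PySem.Str.split₀ g, t ∈ ns) :
    ∀ (sc : PySem.Dict String (PySem.Dict String Int)) (L : List (String × String)),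
      ScoreInv ns L sc → ScoreInv ns (L ++ gpairs gs) (gs.foldl aGiftStep sc) := by
  induction gs with
  | nil => intro sc L hinv; simpa [gpairs] using hinv
  | cons g t ih =>
      intro sc L hinv
      obtain ⟨hlen, hmem⟩ := h g (by simp)
      obtain ⟨p, d, hpd⟩ := List.length_eq_two.mp hlen
      have hp : p ∈ ns := hmem p (by rw [hpd]; simp)
      have hd : d ∈ ns := hmem d (by rw [hpd]; simp)
      rw [List.foldl_cons, gpairs_cons, hpd]
      have hstep := scoreInv_step ns L sc p d hp hd hinv g hpd
      have := ih (fun g' hg' => h g' (List.mem_cons_of_mem _ hg')) _ _ hstep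
      simpa [List.append_assoc] using this

lemma scoreInv_init (friends : List String) :
    ScoreInv (PySem.List.dedup friends) []
      (friends.foldl (fun d name =>
        d.insert name (friends.foldl (fun i f => i.insert f 0) PySem.Dict.empty))
        PySem.Dict.empty) := by
  have hinnerkeys : (friends.foldl (fun i f => i.insert f (0 : Int))
      (PySem.Dict.empty : PySem.Dict String Int)).keys = PySem.List.dedup friends := by
    have := PySem.Dict.keys_foldl_insert (l := friends)
      (f := fun (_ : PySem.Dict String Int) (_ : String) => (0 : Int))
      (d := PySem.Dict.empty)
    simpa [PySem.Set.ofList] using this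
  have hkeys : (friends.foldl (fun d name =>
      d.insert name (friends.foldl (fun i f => i.insert f 0) PySem.Dict.empty))
      (PySem.Dict.empty : PySem.Dict String (PySem.Dict String Int))).keys
      = PySem.List.dedup friends := by
    have := PySem.Dict.keys_foldl_insert (l := friends)
      (f := fun (_ : PySem.Dict String (PySem.Dict String Int)) (_ : String) =>
        friends.foldl (fun i f => i.insert f (0 : Int)) PySem.Dict.empty)
      (d := PySem.Dict.empty)
    simpa [PySem.Set.ofList] using this
  refine ⟨hkeys, fun a ha => ?_⟩
  have hmem : a ∈ friends := (PySem.List.mem_dedup friends a).mp ha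
  have hga : (friends.foldl (fun d name =>
      d.insert name (friends.foldl (fun i f => i.insert f 0) PySem.Dict.empty))
      (PySem.Dict.empty : PySem.Dict String (PySem.Dict String Int))).getD a PySem.Dict.empty
      = friends.foldl (fun i f => i.insert f 0) PySem.Dict.empty := by
    rw [getD_foldl_insert_const]
    simp [hmem]
  rw [hga]
  refine ⟨hinnerkeys, fun k => ?_⟩
  rw [getD_foldl_insert_const, DL_nil]
  split_ifs <;> simp

-- B-side: characterisation of counts / given / received --------------------

lemma bCounts_getD (gs : List String) :
    ∀ (st : PySem.Dict (String × String) Int × PySem.Dict String Int × PySem.Dict String Int)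
      (q : String × String),
      ((gs.foldl bGiftStep st).1).getD q 0 = st.1.getD q 0 + ((gpairs gs).count q : Int) := by
  induction gs with
  | nil => intro st q; simp [gpairs]
  | cons g t ih =>
      intro st q
      rw [List.foldl_cons, ih, gpairs_cons, List.count_append]
      rcases hs : PySem.Str.split₀ g with _ | ⟨p, _ | ⟨d, _ | ⟨e, r⟩⟩⟩ <;>
        simp only [bGiftStep, hs] <;>
        simp [PySem.Dict.getD_insert, List.count_cons, List.count_nil] <;>
        split_ifs <;> simp_all <;> omega

lemma bGiven_getD (gs : List String) :
    ∀ (st : PySem.Dict (String × String) Int × PySem.Dict String Int × PySem.Dict String Int)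
      (a : String),
      ((gs.foldl bGiftStep st).2.1).getD a 0
        = st.2.1.getD a 0 + ((gpairs gs).countP (fun q => q.1 == a) : Int) := by
  induction gs with
  | nil => intro st a; simp [gpairs]
  | cons g t ih =>
      intro st a
      rw [List.foldl_cons, ih, gpairs_cons, List.countP_append]
      rcases hs : PySem.Str.split₀ g with _ | ⟨p, _ | ⟨d, _ | ⟨e, r⟩⟩⟩ <;>
        first
        | (simp only [bGiftStep, hs]
           simp only [PySem.Dict.getD_modify, List.countP_cons, List.countP_nil,
             beq_iff_eq, Nat.cast_add, Nat.cast_ite, Nat.cast_one, Nat.cast_zero]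
           split_ifs <;> subst_vars <;> first | omega | simp_all)
        | simp [bGiftStep, hs]

lemma bRecvd_getD (gs : List String) :
    ∀ (st : PySem.Dict (String × String) Int × PySem.Dict String Int × PySem.Dict String Int)
      (a : String),
      ((gs.foldl bGiftStep st).2.2).getD a 0
        = st.2.2.getD a 0 + ((gpairs gs).countP (fun q => q.2 == a) : Int) := by
  induction gs with
  | nil => intro st a; simp [gpairs]
  | cons g t ih =>
      intro st a
      rw [List.foldl_cons, ih, gpairs_cons, List.countP_append]
      rcases hs : PySem.Str.split₀ g with _ | ⟨p, _ | ⟨d, _ | ⟨e, r⟩⟩⟩ <;>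
        first
        | (simp only [bGiftStep, hs]
           simp only [PySem.Dict.getD_modify, List.countP_cons, List.countP_nil,
             beq_iff_eq, Nat.cast_add, Nat.cast_ite, Nat.cast_one, Nat.cast_zero]
           split_ifs <;> subst_vars <;> first | omega | simp_all)
        | simp [bGiftStep, hs]

-- B-side: the counts dict's keys are exactly the distinct parsed gift pairs

lemma bCounts_mem_keys (gs : List String) :
    ∀ (st : PySem.Dict (String × String) Int × PySem.Dict String Int × PySem.Dict String Int)
      (q : String × String),
      q ∈ ((gs.foldl bGiftStep st).1).keys ↔ q ∈ st.1.keys ∨ q ∈ gpairs gs := by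
  induction gs with
  | nil => intro st q; simp [gpairs]
  | cons g t ih =>
      intro st q
      rw [List.foldl_cons, ih, gpairs_cons]
      rcases hs : PySem.Str.split₀ g with _ | ⟨p, _ | ⟨d, _ | ⟨e, r⟩⟩⟩ <;>
        simp [bGiftStep, hs, PySem.Dict.mem_keys_insert] <;> tauto

lemma bCounts_nodup_keys (gs : List String) :
    ∀ (st : PySem.Dict (String × String) Int × PySem.Dict String Int × PySem.Dict String Int),
      st.1.keys.Nodup → ((gs.foldl bGiftStep st).1).keys.Nodup := by
  induction gs with
  | nil => intro st h; exact h
  | cons g t ih =>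
      intro st h
      rw [List.foldl_cons]
      apply ih
      rcases hs : PySem.Str.split₀ g with _ | ⟨p, _ | ⟨d, _ | ⟨e, r⟩⟩⟩ <;>
        simp only [bGiftStep, hs] <;>
        first | exact h | exact PySem.Dict.nodup_keys_insert _ _ _ h

-- gift participants are friends (under Pre_)
lemma gpairs_mem (gs : List String) (ns : List String)
    (h : ∀ g ∈ gs, (PySem.Str.split₀ g).length = 2 ∧ ∀ t ∈ PySem.Str.split₀ g, t ∈ ns) :
    ∀ q ∈ gpairs gs, q.1 ∈ ns ∧ q.2 ∈ ns := by
  intro q hq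
  obtain ⟨g, hg, hmatch⟩ := List.mem_filterMap.mp hq
  obtain ⟨hlen, hmem⟩ := h g hg
  obtain ⟨p, d, hpd⟩ := List.length_eq_two.mp hlen
  rw [hpd] at hmatch
  simp only [Option.some.injEq] at hmatch
  subst hmatch
  exact ⟨hmem p (by rw [hpd]; simp), hmem d (by rw [hpd]; simp)⟩

-- B-side: the rank loop ------------------------------------------------------

-- in a key-sorted list every element's key is at most the last one's
lemma pairwise_key_le_last (key : String → Int) :
    ∀ (pre : List String) (lst : String),
      pre.Pairwise (fun a b => key a ≤ key b) → pre.getLast? = some lst →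
      ∀ b ∈ pre, key b ≤ key lst := by
  intro pre
  induction pre with
  | nil => intro lst _ h; simp at h
  | cons a t ih =>
      intro lst hpw hlast b hb
      rcases List.pairwise_cons.mp hpw with ⟨ha, ht⟩
      cases t with
      | nil =>
          simp at hlast hb
          subst hlast; subst hb; exact le_refl _
      | cons c u =>
          rw [List.getLast?_cons_cons] at hlast
          have hlmem : lst ∈ c :: u := List.mem_of_getLast? hlast
          rcases List.mem_cons.mp hb with rfl | hbt
          · exact le_trans (ha lst hlmem) (le_refl _)
          · exact ih lst ht hlast b hbt

lemma rank_loop (i : PySem.Dict String Int) :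
    ∀ (l pre : List String) (e : PySem.Dict String Int) (pv : Option Int) (rs : Int),
      (pre ++ l).Pairwise (fun a b => i.getD a 0 ≤ i.getD b 0) →
      (pre ++ l).Nodup →
      (pre = [] → pv = none ∧ rs = 0) →
      (∀ lst, pre.getLast? = some lst → pv = some (i.getD lst 0) ∧
          rs = (pre.countP (fun b => decide (i.getD b 0 < i.getD lst 0)) : Int)) →
      ∀ x, ((PySem.List.enumerate l (pre.length : Int)).foldl (bRankStep i)
          (pv, rs, e)).2.2.getD x 0
        = if x ∈ l then ((pre ++ l).countP (fun b => decide (i.getD b 0 < i.getD x 0)) : Int)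
          else e.getD x 0 := by
  intro l
  induction l with
  | nil =>
      intro pre e pv rs _ _ _ _ x
      simp [PySem.List.enumerate]
  | cons n t ih =>
      intro pre e pv rs hpw hnd h0 hlast x
      rw [PySem.List.enumerate_cons, List.foldl_cons]
      obtain ⟨hpw_pre, hpw_rest, hcross⟩ := List.pairwise_append.mp hpw
      -- the run_start computed for n is the number of strictly smaller keys in pre
      have hrs' : (bRankStep i (pv, rs, e) ((pre.length : Int), n)).2.1
          = (pre.countP (fun b => decide (i.getD b 0 < i.getD n 0)) : Int) := by
        unfold bRankStep
        dsimp only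
        by_cases hpre : pre = []
        · obtain ⟨hpv, hrs⟩ := h0 hpre
          rw [hpv, hrs, hpre]
          simp
        · obtain ⟨lst, hl⟩ := Option.isSome_iff_exists.mp (List.getLast?_isSome.mpr hpre)
          obtain ⟨hpv, hrs⟩ := hlast lst hl
          rw [hpv]
          dsimp only
          have hlmem : lst ∈ pre := List.mem_of_getLast? hl
          have hple : ∀ b ∈ pre, i.getD b 0 ≤ i.getD lst 0 :=
            pairwise_key_le_last (fun b => i.getD b 0) pre lst hpw_pre hl
          have hlen : i.getD lst 0 ≤ i.getD n 0 := hcross lst hlmem n (by simp)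
          by_cases hne : i.getD n 0 ≠ i.getD lst 0
          · have hall : ∀ b ∈ pre, (fun b => decide (i.getD b 0 < i.getD n 0)) b = true := by
              intro b hb
              simp only [decide_eq_true_eq]
              have := hple b hb
              omega
            rw [if_pos hne, ← List.countP_eq_length.mpr hall]
          · rw [if_neg hne, hrs]
            have hcc : pre.countP (fun b => decide (i.getD b 0 < i.getD lst 0))
                = pre.countP (fun b => decide (i.getD b 0 < i.getD n 0)) := by
              apply List.countP_congr
              intro b _
              simp only [decide_eq_true_eq]
              push_neg at hne
              rw [hne]
            exact_mod_cast congrArg (fun (m : Nat) => (m : Int)) hcc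
      -- rewrite the step's dict and prev components
      have hstep : bRankStep i (pv, rs, e) ((pre.length : Int), n)
          = (some (i.getD n 0), (bRankStep i (pv, rs, e) ((pre.length : Int), n)).2.1,
             e.insert n (bRankStep i (pv, rs, e) ((pre.length : Int), n)).2.1) := rfl
      set rs' := (bRankStep i (pv, rs, e) ((pre.length : Int), n)).2.1 with hrsdef
      rw [hstep]
      have hlen1 : (pre.length : Int) + 1 = (((pre ++ [n]).length : Nat) : Int) := by
        rw [List.length_append]
        push_cast
        simp
      rw [hlen1]
      have hassoc : (pre ++ [n]) ++ t = pre ++ n :: t := by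
        rw [List.append_assoc]
        rfl
      have ihres := ih (pre ++ [n]) (e.insert n rs') (some (i.getD n 0)) rs'
        (by rw [hassoc]; exact hpw)
        (by rw [hassoc]; exact hnd)
        (by intro hcon; simp at hcon)
        (by
          intro lst' hl'
          rw [List.getLast?_concat] at hl'
          obtain rfl : lst' = n := by injection hl' with h; exact h.symm
          refine ⟨rfl, ?_⟩
          rw [hrs', List.countP_append]
          simp)
        x
      rw [ihres]
      by_cases hxt : x ∈ t
      · rw [if_pos hxt, if_pos (by simp [hxt]), hassoc]
      · rw [if_neg hxt]
        by_cases hxn : x = n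
        · subst hxn
          rw [if_pos (by simp), PySem.Dict.getD_insert_self, List.countP_append]
          have hnt : (List.countP (fun b => decide (i.getD b 0 < i.getD x 0)) (x :: t)) = 0 := by
            rw [List.countP_eq_zero]
            intro b hb
            simp only [decide_eq_true_eq]
            rcases List.mem_cons.mp hb with rfl | hbt
            · omega
            · have := (List.pairwise_cons.mp hpw_rest).1 b hbt
              omega
          rw [hnt, hrs']
          simp
        · rw [if_neg (by simp [hxt, hxn]), PySem.Dict.getD_insert_of_ne _ _ _ hxn]

-- keys are preserved by the rank loop (every processed name is already a key)
lemma rank_loop_keys (i : PySem.Dict String Int) :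
    ∀ (l : List String) (s : Int) (st : Option Int × Int × PySem.Dict String Int),
      (∀ n ∈ l, n ∈ st.2.2.keys) →
      ((PySem.List.enumerate l s).foldl (bRankStep i) st).2.2.keys = st.2.2.keys := by
  intro l
  induction l with
  | nil => intro s st _; simp [PySem.List.enumerate]
  | cons n t ih =>
      intro s st h
      rw [PySem.List.enumerate_cons, List.foldl_cons]
      have hkeys : ((bRankStep i st (s, n)).2.2).keys = st.2.2.keys := by
        apply PySem.Dict.keys_insert_of_contains
        rw [PySem.Dict.contains_eq_decide_mem_keys]
        simpa using h n (by simp)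
      rw [ih _ _ (by rw [hkeys]; exact fun y hy => h y (List.mem_cons_of_mem _ hy)), hkeys]

-- B-side: the correction loop ------------------------------------------------

lemma bPairStep_getD (c : PySem.Dict (String × String) Int) (i : PySem.Dict String Int)
    (e : PySem.Dict String Int) (kv : (String × String) × Int) (a : String) :
    (bPairStep c i e kv).getD a 0 = e.getD a 0
      + (if kv.1.1 = a ∧ c.getD (kv.1.2, kv.1.1) 0 < kv.2 ∧ i.getD a 0 ≤ i.getD kv.1.2 0
          then 1 else 0)
      - (if kv.1.2 = a ∧ c.getD (kv.1.2, kv.1.1) 0 < kv.2 ∧ i.getD kv.1.1 0 < i.getD a 0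
          then 1 else 0) := by
  rcases kv with ⟨⟨p, d⟩, x⟩
  unfold bPairStep
  dsimp only
  by_cases hxy : x > c.getD (d, p) 0
  · rw [if_pos hxy]
    by_cases h1 : i.getD d 0 ≥ i.getD p 0 <;> by_cases h2 : i.getD p 0 < i.getD d 0 <;>
      simp only [h1, h2, if_true, if_false] <;>
      by_cases hap : p = a <;> by_cases had : d = a <;> subst_vars <;>
      (try simp only [PySem.Dict.getD_modify]) <;> (try split_ifs) <;>
      first | rfl | omega | tauto
  · rw [if_neg hxy]
    have e1 : ¬ (p = a ∧ c.getD (d, p) 0 < x ∧ i.getD a 0 ≤ i.getD d 0) := fun h => hxy h.2.1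
    have e2 : ¬ (d = a ∧ c.getD (d, p) 0 < x ∧ i.getD p 0 < i.getD a 0) := fun h => hxy h.2.1
    rw [if_neg e1, if_neg e2]
    ring

lemma pair_loop (c : PySem.Dict (String × String) Int) (i : PySem.Dict String Int) :
    ∀ (l : List ((String × String) × Int)) (e : PySem.Dict String Int) (a : String),
      (l.foldl (bPairStep c i) e).getD a 0 = e.getD a 0
        + (l.countP (fun kv => decide (kv.1.1 = a ∧ c.getD (kv.1.2, kv.1.1) 0 < kv.2 ∧
            i.getD a 0 ≤ i.getD kv.1.2 0)) : Int)
        - (l.countP (fun kv => decide (kv.1.2 = a ∧ c.getD (kv.1.2, kv.1.1) 0 < kv.2 ∧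
            i.getD kv.1.1 0 < i.getD a 0)) : Int) := by
  intro l
  induction l with
  | nil => intro e a; simp
  | cons kv t ih =>
      intro e a
      rw [List.foldl_cons, ih, bPairStep_getD, List.countP_cons, List.countP_cons]
      by_cases h1 : kv.1.1 = a ∧ c.getD (kv.1.2, kv.1.1) 0 < kv.2 ∧
          i.getD a 0 ≤ i.getD kv.1.2 0 <;>
        by_cases h2 : kv.1.2 = a ∧ c.getD (kv.1.2, kv.1.1) 0 < kv.2 ∧
          i.getD kv.1.1 0 < i.getD a 0 <;>
        simp only [h1, h2, if_pos, if_neg, not_false_iff, decide_eq_true_eq,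
          decide_eq_false_iff_not, if_true, if_false] <;>
        push_cast <;> omega

lemma keys_modify_mem (e : PySem.Dict String Int) (k : String) (f : Int → Int)
    (hk : k ∈ e.keys) : (e.modify k 0 f).keys = e.keys := by
  rw [PySem.Dict.keys_modify]
  apply PySem.Dict.keys_insert_of_contains
  rw [PySem.Dict.contains_eq_decide_mem_keys]
  simpa using hk

lemma bPairStep_keys (c : PySem.Dict (String × String) Int) (i : PySem.Dict String Int)
    (e : PySem.Dict String Int) (kv : (String × String) × Int)
    (hp : kv.1.1 ∈ e.keys) (hd : kv.1.2 ∈ e.keys) :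
    (bPairStep c i e kv).keys = e.keys := by
  rcases kv with ⟨⟨p, d⟩, x⟩
  simp only at hp hd
  unfold bPairStep
  dsimp only
  split_ifs
  · rw [keys_modify_mem _ _ _ (by rw [keys_modify_mem _ _ _ hp]; exact hd),
      keys_modify_mem _ _ _ hp]
  · rw [keys_modify_mem _ _ _ hd]
  · rw [keys_modify_mem _ _ _ hp]
  · rfl
  · rfl

lemma pair_loop_keys (c : PySem.Dict (String × String) Int) (i : PySem.Dict String Int) :
    ∀ (l : List ((String × String) × Int)) (e : PySem.Dict String Int),
      (∀ kv ∈ l, kv.1.1 ∈ e.keys ∧ kv.1.2 ∈ e.keys) →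
      (l.foldl (bPairStep c i) e).keys = e.keys := by
  intro l
  induction l with
  | nil => intro e _; rfl
  | cons kv t ih =>
      intro e h
      rw [List.foldl_cons]
      have hk := bPairStep_keys c i e kv (h kv (by simp)).1 (h kv (by simp)).2
      rw [ih _ (fun q hq => by rw [hk]; exact h q (List.mem_cons_of_mem _ hq)), hk]

-- counting over the pair keys versus counting over the names -----------------

lemma countP_keys_snd (K : List (String × String)) (hK : K.Nodup)
    (ns : List String) (hns : ns.Nodup) (a : String) (P : String → Bool)
    (h1 : ∀ b, P b = true → (a, b) ∈ K)
    (h2 : ∀ b, (a, b) ∈ K → b ∈ ns) :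
    K.countP (fun q => decide (q.1 = a) && P q.2) = ns.countP P := by
  rw [List.countP_eq_length_filter, List.countP_eq_length_filter]
  have hperm : ((K.filter (fun q => decide (q.1 = a) && P q.2)).map (fun q => q.2)).Perm
      (ns.filter P) := by
    rw [List.perm_ext_iff_of_nodup]
    · intro b
      simp only [List.mem_map, List.mem_filter, Bool.and_eq_true, decide_eq_true_eq]
      constructor
      · rintro ⟨q, ⟨hqK, hqa, hqP⟩, rfl⟩
        have hq : q = (a, q.2) := by cases q; simp_all
        exact ⟨h2 _ (hq ▸ hqK), hqP⟩
      · rintro ⟨hb, hP⟩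
        exact ⟨(a, b), ⟨h1 b hP, rfl, hP⟩, rfl⟩
    · apply List.Nodup.map_on
      · intro q hq q' hq' hsnd
        have ha : q.1 = a := by
          have := (List.mem_filter.mp hq).2
          simp only [Bool.and_eq_true, decide_eq_true_eq] at this
          exact this.1
        have ha' : q'.1 = a := by
          have := (List.mem_filter.mp hq').2
          simp only [Bool.and_eq_true, decide_eq_true_eq] at this
          exact this.1
        cases q; cases q'; simp_all
      · exact hK.filter _
    · exact hns.filter _
  have hlen := hperm.length_eq
  rw [List.length_map] at hlen
  exact hlen

lemma countP_keys_fst (K : List (String × String)) (hK : K.Nodup)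
    (ns : List String) (hns : ns.Nodup) (a : String) (P : String → Bool)
    (h1 : ∀ b, P b = true → (b, a) ∈ K)
    (h2 : ∀ b, (b, a) ∈ K → b ∈ ns) :
    K.countP (fun q => decide (q.2 = a) && P q.1) = ns.countP P := by
  rw [List.countP_eq_length_filter, List.countP_eq_length_filter]
  have hperm : ((K.filter (fun q => decide (q.2 = a) && P q.1)).map (fun q => q.1)).Perm
      (ns.filter P) := by
    rw [List.perm_ext_iff_of_nodup]
    · intro b
      simp only [List.mem_map, List.mem_filter, Bool.and_eq_true, decide_eq_true_eq]
      constructor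
      · rintro ⟨q, ⟨hqK, hqa, hqP⟩, rfl⟩
        have hq : q = (q.1, a) := by cases q; simp_all
        exact ⟨h2 _ (hq ▸ hqK), hqP⟩
      · rintro ⟨hb, hP⟩
        exact ⟨(b, a), ⟨h1 b hP, rfl, hP⟩, rfl⟩
    · apply List.Nodup.map_on
      · intro q hq q' hq' hfst
        have ha : q.2 = a := by
          have := (List.mem_filter.mp hq).2
          simp only [Bool.and_eq_true, decide_eq_true_eq] at this
          exact this.1
        have ha' : q'.2 = a := by
          have := (List.mem_filter.mp hq').2
          simp only [Bool.and_eq_true, decide_eq_true_eq] at this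
          exact this.1
        cases q; cases q'; simp_all
      · exact hK.filter _
    · exact hns.filter _
  have hlen := hperm.length_eq
  rw [List.length_map] at hlen
  exact hlen

-- one element of the pointwise split below
lemma head_split (cab cba ia ib : Int) :
    (if cab > cba ∨ (cab = cba ∧ ia > ib) then (1 : Int) else 0)
      = (if ib < ia then (1 : Int) else 0) + (if cba < cab ∧ ia ≤ ib then (1 : Int) else 0)
        - (if cab < cba ∧ ib < ia then (1 : Int) else 0) := by
  split_ifs <;> omega

-- pointwise arithmetic: the pair verdict = rank + strict wins − wrong credits
lemma countP_wcond_split (ns : List String) (c : PySem.Dict (String × String) Int)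
    (i : PySem.Dict String Int) (a : String) :
    (ns.countP (wcond c i a) : Int)
      = (ns.countP (fun b => decide (i.getD b 0 < i.getD a 0)) : Int)
        + (ns.countP (fun b => decide (c.getD (b, a) 0 < c.getD (a, b) 0 ∧
            i.getD a 0 ≤ i.getD b 0)) : Int)
        - (ns.countP (fun b => decide (c.getD (a, b) 0 < c.getD (b, a) 0 ∧
            i.getD b 0 < i.getD a 0)) : Int) := by
  induction ns with
  | nil => simp
  | cons b t ih =>
      have hwb : wcond c i a b = decide (c.getD (a, b) 0 > c.getD (b, a) 0 ∨
          (c.getD (a, b) 0 = c.getD (b, a) 0 ∧ i.getD a 0 > i.getD b 0)) := rfl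
      rw [List.countP_cons, List.countP_cons, List.countP_cons, List.countP_cons, hwb]
      simp only [decide_eq_true_eq]
      push_cast
      rw [ih, head_split]
      ring

-- final assembly ------------------------------------------------------------

-- the common 'max(values) with 0 for the unreachable empty case' wrapper
def ansOf (vals : List Int) : Int :=
  match PySem.List.max? vals (fun y => y) with
  | some m => m
  | none => 0

-- the state of Source B after the gift loop, resp. its index dict (proof-side names
-- for the literal subterms of solution_alt)
def altSt (friends : List String) (gifts : List String) :
    PySem.Dict (String × String) Int × PySem.Dict String Int × PySem.Dict String Int :=
  gifts.foldl bGiftStep (PySem.Dict.empty,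
    friends.foldl (fun d n => d.insert n 0) PySem.Dict.empty,
    friends.foldl (fun d n => d.insert n 0) PySem.Dict.empty)

def altIndex (friends : List String) (gifts : List String) : PySem.Dict String Int :=
  (PySem.List.dedup friends).foldl
    (fun d n => d.insert n ((altSt friends gifts).2.1.getD n 0
      - (altSt friends gifts).2.2.getD n 0)) PySem.Dict.empty

lemma altSt_counts (friends gifts : List String) (q : String × String) :
    (altSt friends gifts).1.getD q 0 = ((gpairs gifts).count q : Int) := by
  unfold altSt
  rw [bCounts_getD]
  simp

lemma zero_init_getD (friends : List String) (x : String) :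
    (friends.foldl (fun d n => d.insert n (0 : Int)) PySem.Dict.empty).getD x 0 = 0 := by
  rw [getD_foldl_insert_const]
  split_ifs <;> simp

lemma altSt_given (friends gifts : List String) (x : String) :
    (altSt friends gifts).2.1.getD x 0
      = ((gpairs gifts).countP (fun q => q.1 == x) : Int) := by
  unfold altSt
  rw [bGiven_getD]
  simp [zero_init_getD]

lemma altSt_recvd (friends gifts : List String) (x : String) :
    (altSt friends gifts).2.2.getD x 0
      = ((gpairs gifts).countP (fun q => q.2 == x) : Int) := by
  unfold altSt
  rw [bRecvd_getD]
  simp [zero_init_getD]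

lemma altIndex_getD (friends gifts : List String) (a : String)
    (ha : a ∈ PySem.List.dedup friends) :
    (altIndex friends gifts).getD a 0 = idxL (gpairs gifts) a := by
  unfold altIndex
  have h := getD_foldl_insert_key (l := PySem.List.dedup friends) (key := fun n => n)
    (F := fun n => (altSt friends gifts).2.1.getD n 0 - (altSt friends gifts).2.2.getD n 0)
    (d := PySem.Dict.empty) (dflt := 0)
    (by simpa using PySem.List.nodup_dedup friends) a ha
  dsimp only at h
  rw [h, altSt_given, altSt_recvd]
  rfl

-- the tie-break bridge: A's per-cell test equals B's pair test, on the parsed pairs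
lemma bridge (friends gifts : List String) (a k : String)
    (ha : a ∈ PySem.List.dedup friends) (hk : k ∈ PySem.List.dedup friends) :
    ((DL (gpairs gifts) a k > 0 ∧ a ≠ k) ∨
      (DL (gpairs gifts) a k = 0 ∧ DL (gpairs gifts) k k < DL (gpairs gifts) a a ∧ a ≠ k))
      ↔ wcond (altSt friends gifts).1 (altIndex friends gifts) a k = true := by
  rw [← wcond_iff, altSt_counts, altSt_counts, altIndex_getD friends gifts a ha,
    altIndex_getD friends gifts k hk]
  by_cases hak : a = k
  · subst hak
    simp [DL, netL]
  · simp only [DL, netL, ne_eq, hak, not_false_iff, and_true, if_true, if_false]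
    omega

lemma ans_foldl_insert (ns : List String) (hnd : ns.Nodup) (g0 : PySem.Dict String Int)
    (hg0 : g0.keys = ns) (F G : String → Int) (hFG : ∀ a ∈ ns, F a = G a) :
    ansOf ((ns.foldl (fun g y => g.insert y (F y)) g0).values) = ansOf (ns.map G) := by
  have hkeys : (ns.foldl (fun g y => g.insert y (F y)) g0).keys = ns := by
    rw [PySem.Dict.keys_foldl_insert (f := fun _ y => F y), hg0]
    exact set_update_eq_self ns ns (fun x hx => hx)
  have hvals := PySem.Dict.values_eq_map_keys (ns.foldl (fun g y => g.insert y (F y)) g0)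
    (by rw [hkeys]; exact hnd) 0
  rw [hkeys] at hvals
  rw [hvals]
  apply congrArg ansOf
  apply List.map_congr_left
  intro a ha
  have h := getD_foldl_insert_key (l := ns) (key := fun n => n) (F := F) (d := g0) (dflt := 0)
    (by simpa using hnd) a ha
  dsimp only at h
  rw [h]
  exact hFG a ha

lemma solution_eq_ans (friends gifts : List String)
    (hg : ∀ g ∈ gifts, (PySem.Str.split₀ g).length = 2 ∧
      ∀ t ∈ PySem.Str.split₀ g, t ∈ friends) :
    solution friends gifts
      = ansOf ((PySem.List.dedup friends).map (fun a =>
          (((PySem.List.dedup friends).countP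
            (wcond (altSt friends gifts).1 (altIndex friends gifts) a)) : Int))) := by
  unfold solution
  dsimp only
  set P := gpairs gifts with hP
  set ns := PySem.List.dedup friends with hns
  set sc0 : PySem.Dict String (PySem.Dict String Int) := friends.foldl (fun d name =>
    d.insert name (friends.foldl (fun i f => i.insert f 0) PySem.Dict.empty))
    PySem.Dict.empty with hsc0
  set score := gifts.foldl aGiftStep sc0 with hscore
  have hInv : ScoreInv ns P score := by
    have := scoreInv_fold ns gifts
      (fun g hg' => ⟨(hg g hg').1,
        fun t ht => (PySem.List.mem_dedup friends t).mpr ((hg g hg').2 t ht)⟩)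
      sc0 [] (scoreInv_init friends)
    simpa using this
  obtain ⟨hSkeys, hSinner⟩ := hInv
  have hnd : ns.Nodup := PySem.List.nodup_dedup friends
  have hitems : score.items = ns.map (fun k => (k, score.getD k PySem.Dict.empty)) := by
    rw [PySem.Dict.items_eq_map_keys score (by rw [hSkeys]; exact hnd) PySem.Dict.empty, hSkeys]
  rw [hitems, List.foldl_map]
  dsimp only
  set gift0 := friends.foldl (fun g n => g.insert n (0 : Int)) PySem.Dict.empty with hg0
  have hg0keys : gift0.keys = ns := by
    rw [hg0]
    have := PySem.Dict.keys_foldl_insert (l := friends)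
      (f := fun (_ : PySem.Dict String Int) (_ : String) => (0 : Int)) (d := PySem.Dict.empty)
    rw [this]
    show PySem.Set.ofList friends = ns
    rw [hns]
    simp
  refine ans_foldl_insert ns hnd gift0 hg0keys _ _ ?_
  intro a ha
  rw [PySem.Dict.items_eq_map_keys (score.getD a PySem.Dict.empty)
    (by rw [(hSinner a ha).1]; exact hnd) 0, (hSinner a ha).1, List.foldl_map]
  dsimp only
  rw [PySem.List.foldl_congr_mem' _ _
    (fun cnt k => if wcond (altSt friends gifts).1 (altIndex friends gifts) a k = true
      then cnt + 1 else cnt) 0 ?_]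
  · rw [PySem.List.foldl_ite_add_one]
    simp
  · intro k hk cnt
    dsimp only
    rw [(hSinner a ha).2 k, (hSinner k hk).2 k, (hSinner a ha).2 a]
    have hb := bridge friends gifts a k ha hk
    by_cases hw : wcond (altSt friends gifts).1 (altIndex friends gifts) a k = true <;>
      split_ifs <;> first | rfl | tauto

lemma solution_alt_eq_ans (friends gifts : List String)
    (hg : ∀ g ∈ gifts, (PySem.Str.split₀ g).length = 2 ∧
      ∀ t ∈ PySem.Str.split₀ g, t ∈ friends) :
    solution_alt friends gifts
      = ansOf ((PySem.List.dedup friends).map (fun a =>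
          (((PySem.List.dedup friends).countP
            (wcond (altSt friends gifts).1 (altIndex friends gifts) a)) : Int))) := by
  have hndns : (PySem.List.dedup friends).Nodup := PySem.List.nodup_dedup friends
  show ansOf
      (((altSt friends gifts).1.items.foldl
          (bPairStep (altSt friends gifts).1 (altIndex friends gifts))
          ((PySem.List.enumerate
              (PySem.List.sorted (PySem.List.dedup friends)
                (fun n => (altIndex friends gifts).getD n 0)) 0).foldl
            (bRankStep (altIndex friends gifts))
            ((none : Option Int), (0 : Int),
              (PySem.List.dedup friends).foldl (fun d n => d.insert n 0)
                PySem.Dict.empty)).2.2).values)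
    = _
  set c := (altSt friends gifts).1
  set i := altIndex friends gifts
  set ns := PySem.List.dedup friends
  set order := PySem.List.sorted ns (fun n => i.getD n 0)
  set extra0 := ns.foldl (fun d n => d.insert n (0 : Int)) PySem.Dict.empty with he0
  set st2 := (PySem.List.enumerate order 0).foldl (bRankStep i)
    ((none : Option Int), (0 : Int), extra0) with hst2
  have hOrdPerm : order.Perm ns := PySem.List.sorted_perm ns _ false
  have hOrdNodup : order.Nodup := (hOrdPerm.nodup_iff).mpr hndns
  have hOrdPw : order.Pairwise (fun a b => i.getD a 0 ≤ i.getD b 0) :=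
    PySem.List.sorted_pairwise ns _
  have he0keys : extra0.keys = ns := by
    rw [he0]
    have := PySem.Dict.keys_foldl_insert (l := ns)
      (f := fun (_ : PySem.Dict String Int) (_ : String) => (0 : Int)) (d := PySem.Dict.empty)
    rw [this]
    show PySem.Set.ofList ns = ns
    exact set_ofList_of_nodup ns hndns
  have hrank : ∀ x, st2.2.2.getD x 0
      = if x ∈ order then ((order.countP (fun b => decide (i.getD b 0 < i.getD x 0))) : Int)
        else extra0.getD x 0 := by
    intro x
    have := rank_loop i order [] extra0 none 0 (by simpa using hOrdPw)
      (by simpa using hOrdNodup) (fun _ => ⟨rfl, rfl⟩) (by intro lst h; simp at h) x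
    simpa using this
  have hrankkeys : st2.2.2.keys = ns := by
    rw [hst2, rank_loop_keys i order 0 _ ?_, he0keys]
    intro n hn
    rw [he0keys]
    exact (hOrdPerm.mem_iff).mp hn
  have hKnodup : c.keys.Nodup := bCounts_nodup_keys gifts _ (by simp)
  have hKmem : ∀ q, q ∈ c.keys ↔ q ∈ gpairs gifts := by
    intro q
    have := bCounts_mem_keys gifts (PySem.Dict.empty,
      friends.foldl (fun d n => d.insert n (0 : Int)) PySem.Dict.empty,
      friends.foldl (fun d n => d.insert n (0 : Int)) PySem.Dict.empty) q
    simpa using this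
  have hcomp : ∀ q, q ∈ c.keys → q.1 ∈ ns ∧ q.2 ∈ ns := by
    intro q hq
    have h := gpairs_mem gifts friends hg q ((hKmem q).mp hq)
    exact ⟨(PySem.List.mem_dedup friends q.1).mpr h.1,
      (PySem.List.mem_dedup friends q.2).mpr h.2⟩
  have hitems : c.items = c.keys.map (fun k => (k, c.getD k 0)) :=
    PySem.Dict.items_eq_map_keys c hKnodup 0
  have hmemitems : ∀ kv, kv ∈ c.items → kv.1 ∈ c.keys := by
    intro kv hkv
    rw [hitems] at hkv
    obtain ⟨k, hkK, rfl⟩ := List.mem_map.mp hkv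
    exact hkK
  have hextrakeys : (c.items.foldl (bPairStep c i) st2.2.2).keys = ns := by
    rw [pair_loop_keys c i _ _ ?_, hrankkeys]
    intro kv hkv
    rw [hrankkeys]
    exact hcomp _ (hmemitems kv hkv)
  have hval : ∀ a ∈ ns, (c.items.foldl (bPairStep c i) st2.2.2).getD a 0
      = ((ns.countP (wcond c i a)) : Int) := by
    intro a ha
    rw [pair_loop c i _ _ a, hrank a, if_pos ((hOrdPerm.mem_iff).mpr ha), hitems,
      List.countP_map, List.countP_map, hOrdPerm.countP_eq]
    have hp1 : c.keys.countP ((fun kv => decide (kv.1.1 = a ∧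
          c.getD (kv.1.2, kv.1.1) 0 < kv.2 ∧ i.getD a 0 ≤ i.getD kv.1.2 0))
            ∘ (fun k => (k, c.getD k 0)))
        = ns.countP (fun b => decide (c.getD (b, a) 0 < c.getD (a, b) 0 ∧
            i.getD a 0 ≤ i.getD b 0)) := by
      rw [List.countP_congr (q := fun q => decide (q.1 = a) &&
          decide (c.getD (q.2, a) 0 < c.getD (a, q.2) 0 ∧ i.getD a 0 ≤ i.getD q.2 0)) ?_]
      · apply countP_keys_snd c.keys hKnodup ns hndns a
          (fun b => decide (c.getD (b, a) 0 < c.getD (a, b) 0 ∧ i.getD a 0 ≤ i.getD b 0))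
        · intro b hb
          simp only [decide_eq_true_eq] at hb
          rw [hKmem]
          have h1 : c.getD (a, b) 0 = ((gpairs gifts).count (a, b) : Int) :=
            altSt_counts friends gifts (a, b)
          have h2 : c.getD (b, a) 0 = ((gpairs gifts).count (b, a) : Int) :=
            altSt_counts friends gifts (b, a)
          apply List.count_pos_iff.mp
          omega
        · intro b hb
          exact (hcomp _ hb).2
      · intro q _
        by_cases hqa : q.1 = a
        · cases q with
          | mk q1 q2 =>
              simp only at hqa
              subst hqa
              simp
        · simp [Function.comp, hqa]
    have hp2 : c.keys.countP ((fun kv => decide (kv.1.2 = a ∧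
          c.getD (kv.1.2, kv.1.1) 0 < kv.2 ∧ i.getD kv.1.1 0 < i.getD a 0))
            ∘ (fun k => (k, c.getD k 0)))
        = ns.countP (fun b => decide (c.getD (a, b) 0 < c.getD (b, a) 0 ∧
            i.getD b 0 < i.getD a 0)) := by
      rw [List.countP_congr (q := fun q => decide (q.2 = a) &&
          decide (c.getD (a, q.1) 0 < c.getD (q.1, a) 0 ∧ i.getD q.1 0 < i.getD a 0)) ?_]
      · apply countP_keys_fst c.keys hKnodup ns hndns a
          (fun b => decide (c.getD (a, b) 0 < c.getD (b, a) 0 ∧ i.getD b 0 < i.getD a 0))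
        · intro b hb
          simp only [decide_eq_true_eq] at hb
          rw [hKmem]
          have h1 : c.getD (a, b) 0 = ((gpairs gifts).count (a, b) : Int) :=
            altSt_counts friends gifts (a, b)
          have h2 : c.getD (b, a) 0 = ((gpairs gifts).count (b, a) : Int) :=
            altSt_counts friends gifts (b, a)
          apply List.count_pos_iff.mp
          omega
        · intro b hb
          exact (hcomp _ hb).1
      · intro q _
        by_cases hqa : q.2 = a
        · cases q with
          | mk q1 q2 =>
              simp only at hqa
              subst hqa
              simp
        · simp [Function.comp, hqa]
    rw [hp1, hp2]
    exact (countP_wcond_split ns c i a).symm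
  have hvnd : (c.items.foldl (bPairStep c i) st2.2.2).keys.Nodup := by
    rw [hextrakeys]
    exact hndns
  rw [PySem.Dict.values_eq_map_keys _ hvnd 0, hextrakeys]
  exact congrArg ansOf (List.map_congr_left hval)

-- ===== VERDICT (by name: the statement is the Claim_ definition above) =====
theorem solution_spec : Claim_equal_solution := by
  intro friends gifts _ hpre
  obtain ⟨hfne, hg⟩ := hpre
  unfold Spec_solution
  rw [solution_eq_ans friends gifts hg, solution_alt_eq_ans friends gifts hg]
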